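-- pv_equiv track=rewrite | github.com/khadas/android_test_vts | utils/python/hal/hal_service_name_utils.py | GetServiceInstancesCombinations
-- ===== SOURCE A (Python) =====
-- def GetServiceInstancesCombinations(services, service_instances):
--     """Create all combinations of instances for all services.
--
--     Args:
--         services: list, all services used in the test. e.g. [s1, s2]
--         service_instances: dictionary, mapping of each service and the
--                            corresponding service name(s).
--                            e.g. {"s1": ["n1"], "s2": ["n2", "n3"]}
--
--     Returns:
--         A list of all service instance combinations.
--         e.g. [[s1/n1, s2/n2], [s1/n1, s2/n3]]
--     """
--     service_instance_combinations = []
--     if not services or (service_instances and type(service_instances) != dict):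
--         return service_instance_combinations
--     service = services.pop()
--     pre_instance_combs = GetServiceInstancesCombinations(services,
--                                                          service_instances)
--     if service not in service_instances or not service_instances[service]:
--         return pre_instance_combs
--     for name in service_instances[service]:
--         if not pre_instance_combs:
--             new_instance_comb = [service + '/' + name]
--             service_instance_combinations.append(new_instance_comb)
--         else:
--             for instance_comb in pre_instance_combs:
--                 new_instance_comb = [service + '/' + name]
--                 new_instance_comb.extend(instance_comb)
--                 service_instance_combinations.append(new_instance_comb)
--
--     return service_instance_combinations
-- ===== SOURCE B (Python) =====
-- def GetServiceInstancesCombinations(services, service_instances):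
--     """Iterative rewrite: pops services in the same order (leaving the list
--     empty, like the original) and grows a running combos list by appending
--     the popped service's entries to each existing combination."""
--     if not services or (service_instances and type(service_instances) != dict):
--         return []
--     combos = []
--     while services:
--         service = services.pop()
--         names = service_instances.get(service) if service_instances else None
--         if not names:
--             continue
--         if combos:
--             combos = [comb + [service + '/' + name]
--                       for comb in combos for name in names]
--         else:
--             combos = [[service + '/' + name] for name in names]
--     return combos
-- ===== Notes on version B (the rewrite author's own statement) =====
-- stated objective: simpler
-- what changed: Replaces A's recursion (recurse on the popped-prefix, then graft the popped service's names onto the recursive result by prepending, grouped per name) with a single iterative while-pop loop that maintains a running combos list and extends each existing combination by appending the popped service's entries.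
import Mathlib
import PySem

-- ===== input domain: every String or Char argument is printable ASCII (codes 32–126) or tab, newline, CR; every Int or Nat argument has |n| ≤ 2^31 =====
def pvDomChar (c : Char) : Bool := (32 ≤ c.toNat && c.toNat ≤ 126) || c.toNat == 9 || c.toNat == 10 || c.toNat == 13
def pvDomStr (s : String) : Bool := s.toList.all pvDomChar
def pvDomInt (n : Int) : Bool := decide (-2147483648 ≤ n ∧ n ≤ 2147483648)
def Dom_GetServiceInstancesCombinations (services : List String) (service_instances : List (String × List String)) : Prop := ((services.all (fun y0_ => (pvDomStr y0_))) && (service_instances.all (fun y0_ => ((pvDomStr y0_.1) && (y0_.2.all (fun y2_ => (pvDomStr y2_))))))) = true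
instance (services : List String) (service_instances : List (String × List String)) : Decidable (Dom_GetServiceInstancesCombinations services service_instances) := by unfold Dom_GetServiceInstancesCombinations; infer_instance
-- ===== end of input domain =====

-- B replaces A's recursion by an explicit pop-loop over the services with a running combos
-- list (objective: simpler, iterative decomposition). Both A and B empty the `services` list
-- in place in Python (A by recursive pop, B by a while-pop loop); the equivalence proved
-- here is about the return value.

-- ===== PORT A =====
-- A recurses after popping the LAST element of `services` (services.pop()).
def GetServiceInstancesCombinations (services : List String) (service_instances : List (String × List String)) : List (List String) :=
  match h : services.getLast? with
  | none => []  -- `if not services: return []` (the non-dict branch of the guard cannot fire under the typing)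
  | some service =>
    let pre := GetServiceInstancesCombinations services.dropLast service_instances
    match (PySem.Dict.ofList service_instances).get? service with
    | none => pre
    | some names =>
      if names.isEmpty then pre
      else
        names.foldl (fun acc name =>
          if pre.isEmpty then acc ++ [[service ++ "/" ++ name]]
          else acc ++ pre.map (fun comb => (service ++ "/" ++ name) :: comb)) []
termination_by services.length
decreasing_by
  have hne : services ≠ [] := by intro hn; simp [hn] at h
  have hl : 0 < services.length := List.length_pos_of_ne_nil hne
  simp only [List.length_dropLast]
  omega

-- ===== PORT B =====
-- B's while-pop loop visits the services from the last to the first: a fold over the reverse.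
def GetServiceInstancesCombinations_alt (services : List String) (service_instances : List (String × List String)) : List (List String) :=
  if services.isEmpty then []
  else
    services.reverse.foldl (fun combos service =>
      match (PySem.Dict.ofList service_instances).get? service with
      | none => combos                      -- `if not names: continue`
      | some names =>
        if names.isEmpty then combos
        else if combos.isEmpty then names.map (fun name => [service ++ "/" ++ name])
        else combos.flatMap (fun comb => names.map (fun name => comb ++ [service ++ "/" ++ name]))) []

-- ===== PRECONDITION & SPEC =====
def Spec_GetServiceInstancesCombinations (services : List String) (service_instances : List (String × List String)) (out : List (List String)) : Prop := out = GetServiceInstancesCombinations_alt services service_instances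
instance (services : List String) (service_instances : List (String × List String)) (out : List (List String)) : Decidable (Spec_GetServiceInstancesCombinations services service_instances out) := by unfold Spec_GetServiceInstancesCombinations; infer_instance

-- ===== CLAIM (what is proved, stated in full; the proofs are below) =====
def Claim_equal_GetServiceInstancesCombinations : Prop := ∀ (services : List String) (service_instances : List (String × List String)), Dom_GetServiceInstancesCombinations services service_instances → Spec_GetServiceInstancesCombinations services service_instances (GetServiceInstancesCombinations services service_instances)

-- ===== LEMMAS AND PROOFS =====

-- A's combining step (per popped last service), as a named function.
def stepA (si : List (String × List String)) (pre : List (List String)) (service : String) : List (List String) :=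
  match (PySem.Dict.ofList si).get? service with
  | none => pre
  | some names =>
    if names.isEmpty then pre
    else
      names.foldl (fun acc name =>
        if pre.isEmpty then acc ++ [[service ++ "/" ++ name]]
        else acc ++ pre.map (fun comb => (service ++ "/" ++ name) :: comb)) []

-- B's loop body, as a named function.
def stepB (si : List (String × List String)) (combos : List (List String)) (service : String) : List (List String) :=
  match (PySem.Dict.ofList si).get? service with
  | none => combos
  | some names =>
    if names.isEmpty then combos
    else if combos.isEmpty then names.map (fun name => [service ++ "/" ++ name])
    else combos.flatMap (fun comb => names.map (fun name => comb ++ [service ++ "/" ++ name]))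

theorem A_nil (si : List (String × List String)) : GetServiceInstancesCombinations [] si = [] := by
  rw [GetServiceInstancesCombinations]
  split
  · rfl
  · next hsome => simp at hsome

theorem A_snoc (t : List String) (x : String) (si : List (String × List String)) :
    GetServiceInstancesCombinations (t ++ [x]) si = stepA si (GetServiceInstancesCombinations t si) x := by
  rw [GetServiceInstancesCombinations]
  split
  · next hnone => simp at hnone
  · next service hsome =>
    have hx : service = x := by
      rw [List.getLast?_concat] at hsome
      exact (Option.some_inj.mp hsome).symm
    subst hx
    simp [stepA]

theorem B_eq_foldr (l : List String) (si : List (String × List String)) :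
    GetServiceInstancesCombinations_alt l si = l.foldr (fun s c => stepB si c s) [] := by
  cases l with
  | nil => rfl
  | cons a t =>
    unfold GetServiceInstancesCombinations_alt
    rw [List.foldl_reverse]
    rfl

-- normal forms of the two steps when the service has a nonempty name list
theorem stepA_some (si : List (String × List String)) (pre : List (List String)) (x : String)
    (ns : List String) (h : (PySem.Dict.ofList si).get? x = some ns) (hne : ns ≠ []) :
    stepA si pre x =
      ns.flatMap (fun n => (if pre.isEmpty then [[]] else pre).map (fun comb => (x ++ "/" ++ n) :: comb)) := by
  unfold stepA
  rw [h]
  simp only [List.isEmpty_eq_false_iff.mpr hne, Bool.false_eq_true, if_false]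
  by_cases hp : pre.isEmpty
  · simp only [hp, ite_true]
    rw [PySem.List.foldl_append_singleton_eq_map]
    simp [List.map_eq_flatMap]
  · simp only [hp, Bool.false_eq_true, ite_false]
    have := PySem.List.foldl_append_eq_flatMap
      (l := ns) (acc := ([] : List (List String)))
      (g := fun n => pre.map (fun comb => (x ++ "/" ++ n) :: comb))
    simpa using this

theorem stepB_some (si : List (String × List String)) (c : List (List String)) (x : String)
    (ns : List String) (h : (PySem.Dict.ofList si).get? x = some ns) (hne : ns ≠ []) :
    stepB si c x =
      (if c.isEmpty then [[]] else c).flatMap (fun comb => ns.map (fun n => comb ++ [x ++ "/" ++ n])) := by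
  unfold stepB
  rw [h]
  simp only [List.isEmpty_eq_false_iff.mpr hne, Bool.false_eq_true, if_false]
  by_cases hc : c.isEmpty
  · simp [hc]
  · simp [hc]

theorem stepA_skip (si : List (String × List String)) (pre : List (List String)) (x : String)
    (h : ∀ ns, (PySem.Dict.ofList si).get? x = some ns → ns = []) :
    stepA si pre x = pre := by
  unfold stepA
  cases hx : (PySem.Dict.ofList si).get? x with
  | none => rfl
  | some ns => simp [h ns hx]

theorem stepB_skip (si : List (String × List String)) (c : List (List String)) (x : String)
    (h : ∀ ns, (PySem.Dict.ofList si).get? x = some ns → ns = []) :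
    stepB si c x = c := by
  unfold stepB
  cases hx : (PySem.Dict.ofList si).get? x with
  | none => rfl
  | some ns => simp [h ns hx]

theorem base_ne_nil (c : List (List String)) : (if c.isEmpty then [[]] else c) ≠ [] := by
  cases c <;> simp

theorem stepB_some_ne_nil (si : List (String × List String)) (c : List (List String)) (x : String)
    (ns : List String) (h : (PySem.Dict.ofList si).get? x = some ns) (hne : ns ≠ []) :
    stepB si c x ≠ [] := by
  rw [stepB_some si c x ns h hne]
  simp only [ne_eq, List.flatMap_eq_nil_iff, not_forall]
  rcases List.exists_mem_of_ne_nil _ (base_ne_nil c) with ⟨comb, hcomb⟩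
  exact ⟨comb, hcomb, by simp [hne]⟩

theorem stepA_some_ne_nil (si : List (String × List String)) (pre : List (List String)) (y : String)
    (ns : List String) (h : (PySem.Dict.ofList si).get? y = some ns) (hne : ns ≠ []) :
    stepA si pre y ≠ [] := by
  rw [stepA_some si pre y ns h hne]
  simp only [ne_eq, List.flatMap_eq_nil_iff, not_forall]
  rcases List.exists_mem_of_ne_nil _ hne with ⟨n, hn⟩
  refine ⟨n, hn, ?_⟩
  split <;> simp_all

-- the two steps commute: prepending service y's names and appending service x's names are independent
theorem step_comm (si : List (String × List String)) (c : List (List String)) (x y : String) :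
    stepA si (stepB si c x) y = stepB si (stepA si c y) x := by
  cases hx : (PySem.Dict.ofList si).get? x with
  | none =>
    rw [stepB_skip si c x (by simp [hx]), stepB_skip si _ x (by simp [hx])]
  | some nx =>
    by_cases hnx : nx = []
    · rw [stepB_skip si c x (by simp [hx, hnx]), stepB_skip si _ x (by simp [hx, hnx])]
    cases hy : (PySem.Dict.ofList si).get? y with
    | none =>
      rw [stepA_skip si _ y (by simp [hy]), stepA_skip si c y (by simp [hy])]
    | some ny =>
      by_cases hny : ny = []
      · rw [stepA_skip si _ y (by simp [hy, hny]), stepA_skip si c y (by simp [hy, hny])]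
      rw [stepA_some si _ y ny hy hny, stepB_some si c x nx hx hnx,
          stepB_some si _ x nx hx hnx, stepA_some si c y ny hy hny]
      have h1 : ((if c.isEmpty then [[]] else c).flatMap
          (fun comb => nx.map (fun n => comb ++ [x ++ "/" ++ n]))).isEmpty = false := by
        have := stepB_some_ne_nil si c x nx hx hnx
        rw [stepB_some si c x nx hx hnx] at this
        simpa using this
      have h2 : (ny.flatMap (fun n => (if c.isEmpty then [[]] else c).map
          (fun comb => (y ++ "/" ++ n) :: comb))).isEmpty = false := by
        have := stepA_some_ne_nil si c y ny hy hny
        rw [stepA_some si c y ny hy hny] at this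
        simpa using this
      rw [h1, h2]
      simp only [Bool.false_eq_true, if_false]
      simp only [List.map_flatMap, List.flatMap_assoc, List.flatMap_map, List.map_map]
      simp [Function.comp_def]

-- A on a cons, expressed through B's loop body
theorem A_cons (x : String) (t : List String) (si : List (String × List String)) :
    GetServiceInstancesCombinations (x :: t) si = stepB si (GetServiceInstancesCombinations t si) x := by
  induction t using List.reverseRecOn with
  | nil =>
    have h1 : GetServiceInstancesCombinations ([x]) si = stepA si [] x := by
      have := A_snoc [] x si
      simpa [A_nil] using this
    rw [h1, A_nil]
    cases hx : (PySem.Dict.ofList si).get? x with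
    | none => rw [stepA_skip si [] x (by simp [hx]), stepB_skip si [] x (by simp [hx])]
    | some ns =>
      by_cases hns : ns = []
      · rw [stepA_skip si [] x (by simp [hx, hns]), stepB_skip si [] x (by simp [hx, hns])]
      · rw [stepA_some si [] x ns hx hns, stepB_some si [] x ns hx hns]
        simp [List.map_eq_flatMap]
  | append_singleton t y ih =>
    have : x :: (t ++ [y]) = (x :: t) ++ [y] := by simp
    rw [this, A_snoc, ih, step_comm, ← A_snoc]

theorem A_eq_foldr (l : List String) (si : List (String × List String)) :
    GetServiceInstancesCombinations l si = l.foldr (fun s c => stepB si c s) [] := by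
  induction l with
  | nil => exact A_nil si
  | cons a t ih => rw [A_cons, ih]; rfl

-- ===== VERDICT (by name: the statement is the Claim_ definition above) =====
theorem GetServiceInstancesCombinations_spec : Claim_equal_GetServiceInstancesCombinations := by
  intro services si _
  unfold Spec_GetServiceInstancesCombinations
  rw [A_eq_foldr, B_eq_foldr]
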